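-- pv_equiv track=rewrite | github.com/Venu6255/password-strength-analyzer | pssw_analyzer.py | _check_repeated_characters
-- ===== SOURCE A (Python) =====
-- def _check_repeated_characters(password):
--     """Check for repeated characters"""
--     repeated = []
--     i = 0
--     while i < len(password) - 2:
--         if password[i] == password[i+1] == password[i+2]:
--             repeated.append(password[i] * 3)
--             i += 3
--         else:
--             i += 1
--
--     return repeated
-- ===== SOURCE B (Python) =====
-- def _check_repeated_characters(password):
--     """Check for repeated characters (run-length grouping version)"""
--     repeated = []
--     i = 0
--     n = len(password)
--     while i < n:
--         j = i + 1
--         while j < n and password[j] == password[i]: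
--             j += 1
--         repeated.extend([password[i] * 3] * ((j - i) // 3))
--         i = j
--     return repeated
-- ===== Notes on version B (the rewrite author's own statement) =====
-- stated objective: alternative
-- what changed: Replaces the greedy index-skip triple scan with run-length grouping: each maximal run of length L contributes floor(L/3) copies of the tripled character.
import Mathlib
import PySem

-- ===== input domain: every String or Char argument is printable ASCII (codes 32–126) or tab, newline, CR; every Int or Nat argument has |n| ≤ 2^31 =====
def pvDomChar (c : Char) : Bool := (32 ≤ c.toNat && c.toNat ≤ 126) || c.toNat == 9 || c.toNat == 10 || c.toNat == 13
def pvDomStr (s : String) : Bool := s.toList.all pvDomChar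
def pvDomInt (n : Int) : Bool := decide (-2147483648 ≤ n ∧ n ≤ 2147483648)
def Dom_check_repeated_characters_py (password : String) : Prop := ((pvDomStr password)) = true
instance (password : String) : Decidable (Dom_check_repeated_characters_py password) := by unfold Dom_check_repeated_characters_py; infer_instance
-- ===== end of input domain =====

-- B replaces A's greedy index-skip triple scan by run-length grouping (floor(L/3) triples
-- per maximal run); same O(n) cost, different traversal (objective: alternative).

-- ===== PORT A =====
-- A's while loop: at position i with at least 3 chars remaining, emit a triple and skip 3,
-- else advance 1. Transliterated as recursion over the remaining suffix of the char list.
def loopA_check : List Char → List String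
  | a :: b :: c :: rest =>
      if a = b ∧ b = c then String.ofList [a, a, a] :: loopA_check rest
      else loopA_check (b :: c :: rest)
  | _ => []
termination_by l => l.length

def check_repeated_characters_py (password : String) : List String :=
  loopA_check password.toList

-- ===== PORT B =====
-- Source B's outer while loop: take the maximal run starting at i (inner scan = takeWhile),
-- extend by floor(runLength/3) copies of the tripled char, continue after the run.
def runB_check : List Char → List String
  | [] => []
  | c :: t =>
      List.replicate (((t.takeWhile (· = c)).length + 1) / 3) (String.ofList [c, c, c]) ++
        runB_check (t.dropWhile (· = c))
termination_by l => l.length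
decreasing_by
  simpa using Nat.lt_succ_of_le (List.length_dropWhile_le _ t)

def check_repeated_characters_py_alt (password : String) : List String :=
  runB_check password.toList

-- ===== PRECONDITION & SPEC =====
def Spec_check_repeated_characters_py (password : String) (out : List String) : Prop := out = check_repeated_characters_py_alt password
instance (password : String) (out : List String) : Decidable (Spec_check_repeated_characters_py password out) := by unfold Spec_check_repeated_characters_py; infer_instance

-- ===== CLAIM (what is proved, stated in full; the proofs are below) =====
def Claim_equal_check_repeated_characters_py : Prop := ∀ (password : String), Dom_check_repeated_characters_py password → Spec_check_repeated_characters_py password (check_repeated_characters_py password)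

-- ===== LEMMAS AND PROOFS =====

-- A run of length 1 followed by a different char contributes nothing.
lemma loopA_one (c : Char) (rest : List Char)
    (h : ∀ d, rest.head? = some d → d ≠ c) :
    loopA_check (c :: rest) = loopA_check rest := by
  match rest with
  | [] => simp [loopA_check]
  | [b] => simp [loopA_check]
  | b :: d :: r =>
      have hb : b ≠ c := h b rfl
      have : ¬ (c = b ∧ b = d) := by rintro ⟨rfl, -⟩; exact hb rfl
      simp [loopA_check, this]

lemma loopA_two (c : Char) (rest : List Char)
    (h : ∀ d, rest.head? = some d → d ≠ c) :
    loopA_check (c :: c :: rest) = loopA_check rest := by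
  match rest with
  | [] => simp [loopA_check]
  | b :: r =>
      have hb : b ≠ c := h b rfl
      have : ¬ (c = c ∧ c = b) := by rintro ⟨-, rfl⟩; exact hb rfl
      rw [show loopA_check (c :: c :: b :: r) = loopA_check (c :: b :: r) by
            simp [loopA_check, Ne.symm hb]]
      exact loopA_one c (b :: r) h

-- The key run lemma: A's greedy scan over a maximal run of length L emits ⌊L/3⌋ triples.
lemma loopA_run (L : Nat) (c : Char) (rest : List Char)
    (h : ∀ d, rest.head? = some d → d ≠ c) :
    loopA_check (List.replicate L c ++ rest) =
      List.replicate (L / 3) (String.ofList [c, c, c]) ++ loopA_check rest := by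
  induction L using Nat.strong_induction_on with
  | _ L IH =>
    match L with
    | 0 => simp
    | 1 => simpa using loopA_one c rest h
    | 2 => simpa using loopA_two c rest h
    | (k + 3) =>
        have hrepl : List.replicate (k + 3) c ++ rest =
            c :: c :: c :: (List.replicate k c ++ rest) := by
          simp [List.replicate_succ]
        have hstep : loopA_check (List.replicate (k + 3) c ++ rest) =
            String.ofList [c, c, c] :: loopA_check (List.replicate k c ++ rest) := by
          rw [hrepl]; simp [loopA_check]
        rw [hstep, IH k (by omega) ]
        have hdiv : (k + 3) / 3 = k / 3 + 1 := by omega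
        simp [hdiv, List.replicate_succ]

lemma head?_dropWhile_false (p : Char → Bool) (l : List Char) :
    ∀ d, (l.dropWhile p).head? = some d → p d = false := by
  induction l with
  | nil => intro d h; simp at h
  | cons a t ih =>
      intro d h
      by_cases hp : p a
      · rw [List.dropWhile_cons_of_pos hp] at h; exact ih d h
      · rw [List.dropWhile_cons_of_neg hp] at h
        simp at h
        subst h
        exact Bool.eq_false_iff.mpr hp

-- The main equivalence on char lists, by strong induction on the length.
lemma loopA_eq_runB : ∀ (n : Nat) (l : List Char), l.length ≤ n → loopA_check l = runB_check l := by
  intro n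
  induction n with
  | zero =>
      intro l h
      have : l = [] := List.length_eq_zero_iff.mp (Nat.le_zero.mp h)
      subst this
      simp [loopA_check, runB_check]
  | succ n IH =>
      intro l h
      match l with
      | [] => simp [loopA_check, runB_check]
      | c :: t =>
          set pre := t.takeWhile (· = c) with hpre
          set drop := t.dropWhile (· = c) with hdrop
          have hpre_repl : pre = List.replicate pre.length c := by
            apply List.eq_replicate_of_mem
            intro x hx
            have := List.mem_takeWhile_imp (hpre ▸ hx)
            exact of_decide_eq_true this
          have hsplit : c :: t = List.replicate (pre.length + 1) c ++ drop := by
            rw [List.replicate_succ]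
            simp only [List.cons_append]
            congr 1
            conv_lhs => rw [← List.takeWhile_append_dropWhile (p := (· = c)) (l := t)]
            rw [← hpre, ← hdrop, ← hpre_repl]
          have hhead : ∀ d, drop.head? = some d → d ≠ c := by
            intro d hd
            have := head?_dropWhile_false (· = c) t d (hdrop ▸ hd)
            simpa using this
          have hdroplen : drop.length ≤ n := by
            have hlen : drop.length ≤ t.length := by
              rw [hdrop]; exact List.length_dropWhile_le _ t
            have ht : t.length ≤ n := by simpa using Nat.le_of_succ_le_succ h
            omega
          calc loopA_check (c :: t)
              = loopA_check (List.replicate (pre.length + 1) c ++ drop) := by rw [← hsplit]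
            _ = List.replicate ((pre.length + 1) / 3) (String.ofList [c, c, c]) ++ loopA_check drop :=
                loopA_run (pre.length + 1) c drop hhead
            _ = List.replicate ((pre.length + 1) / 3) (String.ofList [c, c, c]) ++ runB_check drop := by
                rw [IH drop hdroplen]
            _ = runB_check (c :: t) := by rw [runB_check]

-- ===== VERDICT (by name: the statement is the Claim_ definition above) =====
theorem check_repeated_characters_py_spec : Claim_equal_check_repeated_characters_py := by
  intro password _
  unfold Spec_check_repeated_characters_py check_repeated_characters_py check_repeated_characters_py_alt
  exact loopA_eq_runB password.toList.length password.toList (le_refl _)
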